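-- pv_equiv track=rewrite | github.com/Zombinator85/SentientOS | sentientos/forge_outcomes.py | _infer_no_improvement_streak
-- ===== SOURCE A (Python) =====
-- from typing import Any
--
-- def _infer_no_improvement_streak(progress: list[Any]) -> int:
--     streak = 0
--     for row in reversed(progress):
--         if not isinstance(row, dict):
--             continue
--         delta_payload = row.get("delta")
--         if not isinstance(delta_payload, dict):
--             continue
--         if bool(delta_payload.get("improved", False)):
--             break
--         streak += 1
--     return streak
-- ===== SOURCE B (Python) =====
-- from typing import Any
--
-- def _infer_no_improvement_streak(progress: list[Any]) -> int:
--     # Stage 1: project each qualifying row to its "improved" flag.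
--     flags = [bool(row["delta"].get("improved", False))
--              for row in progress
--              if isinstance(row, dict) and isinstance(row.get("delta"), dict)]
--     # Stage 2: the streak is the number of flags after the last True,
--     # i.e. the position of the first True in the reversed flag list.
--     try:
--         return flags[::-1].index(True)
--     except ValueError:
--         return len(flags)
-- ===== Notes on version B (the rewrite author's own statement) =====
-- stated objective: alternative
-- what changed: Replaced A's reversed early-exit accumulator loop by two staged passes: a comprehension projecting qualifying rows to their improved flags, then the index of the first True in the reversed flag list (or its length if absent).
import Mathlib
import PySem

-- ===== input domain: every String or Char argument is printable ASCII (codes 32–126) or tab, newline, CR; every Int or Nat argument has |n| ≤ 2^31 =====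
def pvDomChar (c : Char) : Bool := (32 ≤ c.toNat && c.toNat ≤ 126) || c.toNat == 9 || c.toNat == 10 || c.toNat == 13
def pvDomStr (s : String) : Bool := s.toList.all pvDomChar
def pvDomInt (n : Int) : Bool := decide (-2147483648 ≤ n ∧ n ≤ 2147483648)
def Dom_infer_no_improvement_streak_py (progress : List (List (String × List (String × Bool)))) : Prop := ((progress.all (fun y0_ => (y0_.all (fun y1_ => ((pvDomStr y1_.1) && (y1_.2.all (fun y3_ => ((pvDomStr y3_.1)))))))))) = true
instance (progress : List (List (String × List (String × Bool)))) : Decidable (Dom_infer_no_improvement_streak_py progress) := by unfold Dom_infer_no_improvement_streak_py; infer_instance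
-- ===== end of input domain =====

-- B replaces A's reversed early-exit accumulator loop by two staged passes
-- (project qualifying rows to improved-flags, then index of first True in the
-- reversed flag list); same O(n) cost (objective: alternative).


-- ===== PORT A =====
-- Loop over reversed(progress) carrying `streak`; `break` returns the current streak.
-- Under the type convention every row IS a dict and every present "delta" IS a dict,
-- so the two isinstance guards reduce to the key-presence check of row.get("delta").
def inferLoopA (streak : Int) : List (List (String × List (String × Bool))) → Int
  | [] => streak
  | row :: rest =>
    match (PySem.Dict.mk row).get? "delta" with
    | none => inferLoopA streak rest
    | some delta =>
      if (PySem.Dict.mk delta).getD "improved" false then streak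
      else inferLoopA (streak + 1) rest

def infer_no_improvement_streak_py (progress : List (List (String × List (String × Bool)))) : Int :=
  inferLoopA 0 progress.reverse

-- ===== PORT B =====
-- Stage 1 (the comprehension): project each row with a dict "delta" to its improved flag.
def inferFlagsB (progress : List (List (String × List (String × Bool)))) : List Bool :=
  progress.filterMap (fun row =>
    ((PySem.Dict.mk row).get? "delta").map (fun d => (PySem.Dict.mk d).getD "improved" false))

-- Stage 2: flags[::-1].index(True), or len(flags) on ValueError.
def infer_no_improvement_streak_py_alt (progress : List (List (String × List (String × Bool)))) : Int :=
  let flags := inferFlagsB progress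
  match PySem.List.index? flags.reverse true with
  | some i => (i : Int)
  | none => (flags.length : Int)

-- ===== PRECONDITION & SPEC =====
def Spec_infer_no_improvement_streak_py (progress : List (List (String × List (String × Bool)))) (out : Int) : Prop := out = infer_no_improvement_streak_py_alt progress
instance (progress : List (List (String × List (String × Bool)))) (out : Int) : Decidable (Spec_infer_no_improvement_streak_py progress out) := by unfold Spec_infer_no_improvement_streak_py; infer_instance

-- ===== CLAIM =====
def Claim_equal_infer_no_improvement_streak_py : Prop := ∀ (progress : List (List (String × List (String × Bool)))), Dom_infer_no_improvement_streak_py progress → Spec_infer_no_improvement_streak_py progress (infer_no_improvement_streak_py progress)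

-- ===== LEMMAS AND PROOFS =====
theorem inferLoopA_shift (r : List (List (String × List (String × Bool)))) (s : Int) :
    inferLoopA s r = s + inferLoopA 0 r := by
  induction r generalizing s with
  | nil => simp [inferLoopA]
  | cons row rest ih =>
    simp only [inferLoopA]
    cases (PySem.Dict.mk row).get? "delta" with
    | none => exact ih s
    | some delta =>
      by_cases h : (PySem.Dict.mk delta).getD "improved" false
      · simp [h]
      · simp [h, ih (s + 1), ih 1]; ring

-- inferFlagsB on a cons, by the head row's "delta" lookup.
theorem inferFlagsB_cons_none (row : List (String × List (String × Bool)))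
    (rest : List (List (String × List (String × Bool))))
    (hq : (PySem.Dict.mk row).get? "delta" = none) :
    inferFlagsB (row :: rest) = inferFlagsB rest := by
  simp [inferFlagsB, hq]

theorem inferFlagsB_cons_some (row : List (String × List (String × Bool)))
    (rest : List (List (String × List (String × Bool)))) (delta : List (String × Bool))
    (hq : (PySem.Dict.mk row).get? "delta" = some delta) :
    inferFlagsB (row :: rest) =
      (PySem.Dict.mk delta).getD "improved" false :: inferFlagsB rest := by
  simp [inferFlagsB, hq]

-- A's loop on a list computes the first-True index (or total length) of that list's flags.
theorem inferLoopA_eq_index (r : List (List (String × List (String × Bool)))) :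
    inferLoopA 0 r =
      match PySem.List.index? (inferFlagsB r) true with
      | some i => (i : Int)
      | none => ((inferFlagsB r).length : Int) := by
  induction r with
  | nil => simp [inferLoopA, inferFlagsB, PySem.List.index?]
  | cons row rest ih =>
    simp only [inferLoopA]
    cases hq : (PySem.Dict.mk row).get? "delta" with
    | none => rw [inferFlagsB_cons_none _ _ hq]; exact ih
    | some delta =>
      rw [inferFlagsB_cons_some _ _ _ hq]
      by_cases h : (PySem.Dict.mk delta).getD "improved" false
      · simp [h, List.idxOf?_cons]
      · rw [Bool.not_eq_true] at h
        simp only [h, Bool.false_eq_true, if_false]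
        rw [inferLoopA_shift, ih]
        simp only [PySem.List.index?_eq_idxOf?, List.idxOf?_cons]
        cases hix : List.idxOf? true (inferFlagsB rest) with
        | none => simp; exact Int.add_comm 1 _
        | some i => simp; exact Int.add_comm 1 _

-- ===== VERDICT =====
theorem infer_no_improvement_streak_py_spec : Claim_equal_infer_no_improvement_streak_py := by
  intro progress _
  unfold Spec_infer_no_improvement_streak_py infer_no_improvement_streak_py
    infer_no_improvement_streak_py_alt
  rw [inferLoopA_eq_index]
  have hrev : inferFlagsB progress.reverse = (inferFlagsB progress).reverse := by
    simp [inferFlagsB, List.filterMap_reverse]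
  rw [hrev, List.length_reverse]
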